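-- pv_equiv track=rewrite | github.com/cvelazquez322/LeetResume-2022 | LeetRes/Easy/2042. Check if Numbers Are Ascending in a Sentence.py | sttl
-- ===== SOURCE A (Python) =====
-- def sttl(s):
--     rlist, ints = [], ''
--     for x in s:
--         if x.isdecimal():
--             ints += x
--         elif not x.isdecimal() and ints:
--             rlist.append(int(ints))
--             ints = ''
--     if ints:
--         rlist.append(int(ints))
--     return rlist
-- ===== SOURCE B (Python) =====
-- from itertools import groupby
--
-- def sttl(s):
--     return [int(''.join(g)) for k, g in groupby(s, key=str.isdecimal) if k]
-- ===== Notes on version B (the rewrite author's own statement) =====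
-- stated objective: idiomatic
-- what changed: Replaces the manual char-by-char accumulator loop with trailing flush by an itertools.groupby over isdecimal runs and a single comprehension converting each digit run.
import Mathlib
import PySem

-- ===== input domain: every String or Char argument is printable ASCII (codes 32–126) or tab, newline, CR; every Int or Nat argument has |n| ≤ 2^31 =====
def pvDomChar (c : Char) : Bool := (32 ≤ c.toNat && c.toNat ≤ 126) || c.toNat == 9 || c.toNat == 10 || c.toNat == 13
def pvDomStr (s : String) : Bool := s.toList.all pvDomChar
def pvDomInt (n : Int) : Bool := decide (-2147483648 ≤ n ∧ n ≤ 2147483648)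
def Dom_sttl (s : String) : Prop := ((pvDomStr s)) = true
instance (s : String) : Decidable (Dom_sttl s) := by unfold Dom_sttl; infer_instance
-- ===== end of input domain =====

-- B replaces A's manual accumulator loop (with trailing flush) by grouping the string
-- into maximal decimal runs and converting each run; objective: more idiomatic.

-- shared character test: str.isdecimal, exact on the ASCII domain ('0'..'9')
def pvIsDec (c : Char) : Bool := PySem.Chars.isdigit c

-- int(<nonempty decimal string>), exact on decimal-digit runs
def pvDigitsVal (ds : List Char) : Int :=
  ds.foldl (fun a c => 10 * a + ((c.toNat : Int) - 48)) 0

-- ===== PORT A =====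
-- A's loop state: (rlist, ints); branches in A's order; trailing flush after the loop.
def sttlStep (st : List Int × List Char) (x : Char) : List Int × List Char :=
  if pvIsDec x then (st.1, st.2 ++ [x])
  else if ¬ pvIsDec x ∧ st.2 ≠ [] then (st.1 ++ [pvDigitsVal st.2], [])
  else st

def sttl (s : String) : List Int :=
  let st := s.toList.foldl sttlStep ([], [])
  if st.2 ≠ [] then st.1 ++ [pvDigitsVal st.2] else st.1

-- ===== PORT B =====
-- groupby(s, key=str.isdecimal): each maximal decimal run (takeWhile/dropWhile) yields int(run).
def sttlGroups : List Char → List Int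
  | [] => []
  | c :: cs =>
    if pvIsDec c then
      pvDigitsVal (c :: cs.takeWhile pvIsDec) :: sttlGroups (cs.dropWhile pvIsDec)
    else sttlGroups cs
  termination_by cs => cs.length
  decreasing_by
  · exact Nat.lt_succ_of_le (List.length_dropWhile_le pvIsDec cs)
  · simp

def sttl_alt (s : String) : List Int := sttlGroups s.toList

-- ===== PRECONDITION & SPEC =====
def Spec_sttl (s : String) (out : List Int) : Prop := out = sttl_alt s
instance (s : String) (out : List Int) : Decidable (Spec_sttl s out) := by unfold Spec_sttl; infer_instance

-- ===== CLAIM (what is proved, stated in full; the proofs are below) =====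
def Claim_equal_sttl : Prop := ∀ (s : String), Dom_sttl s → Spec_sttl s (sttl s)

-- ===== LEMMAS AND PROOFS =====

-- pending digit accumulator acc merged with the leading run of cs
def sttlGroupsAcc (acc cs : List Char) : List Int :=
  if acc = [] then sttlGroups cs
  else pvDigitsVal (acc ++ cs.takeWhile pvIsDec) :: sttlGroups (cs.dropWhile pvIsDec)

theorem sttlStep_dec (r : List Int) (acc : List Char) (c : Char) (hc : pvIsDec c = true) :
    sttlStep (r, acc) c = (r, acc ++ [c]) := by simp [sttlStep, hc]

theorem sttlStep_flush (r : List Int) (acc : List Char) (c : Char) (hc : ¬ pvIsDec c = true)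
    (ha : acc ≠ []) : sttlStep (r, acc) c = (r ++ [pvDigitsVal acc], []) := by
  simp [sttlStep, hc, ha]

theorem sttlStep_skip (r : List Int) (c : Char) (hc : ¬ pvIsDec c = true) :
    sttlStep (r, []) c = (r, []) := by simp [sttlStep, hc]

theorem sttl_loop_inv (cs : List Char) : ∀ (r : List Int) (acc : List Char),
    (let st := cs.foldl sttlStep (r, acc)
     if st.2 ≠ [] then st.1 ++ [pvDigitsVal st.2] else st.1) = r ++ sttlGroupsAcc acc cs := by
  induction cs with
  | nil =>
    intro r acc
    by_cases h : acc = [] <;> simp [sttlGroupsAcc, sttlGroups, h]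
  | cons c cs ih =>
    intro r acc
    by_cases hc : pvIsDec c
    · have h := ih r (acc ++ [c])
      simp only [List.foldl_cons, sttlStep_dec _ _ _ hc] at h ⊢
      rw [h]
      by_cases ha : acc = [] <;>
        simp [sttlGroupsAcc, sttlGroups, ha, hc]
    · by_cases ha : acc = []
      · subst ha
        have h := ih r []
        simp only [List.foldl_cons, sttlStep_skip _ _ hc] at h ⊢
        rw [h]
        simp [sttlGroupsAcc, sttlGroups, hc]
      · have h := ih (r ++ [pvDigitsVal acc]) []
        simp only [List.foldl_cons, sttlStep_flush _ _ _ hc ha] at h ⊢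
        rw [h]
        simp [sttlGroupsAcc, sttlGroups, hc, ha]

-- ===== VERDICT (by name: the statement is the Claim_ definition above) =====
theorem sttl_spec : Claim_equal_sttl := by
  intro s _
  unfold Spec_sttl sttl sttl_alt
  have := sttl_loop_inv s.toList [] []
  simpa [sttlGroupsAcc] using this
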